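-- pv_equiv track=rewrite | github.com/dmaccumber/whist | src/whist/players/ai/minimax.py | _iter_bits_asc
-- ===== SOURCE A (Python) =====
-- def _iter_bits_asc(mask: int) -> list[int]:
--     result = []
--     m = mask
--     while m:
--         bit = m & (-m)
--         result.append(bit.bit_length() - 1)
--         m ^= bit
--     return result
-- ===== SOURCE B (Python) =====
-- def _iter_bits_asc(mask: int) -> list[int]:
--     if mask == 0:
--         return []
--     rest = [i + 1 for i in _iter_bits_asc(mask >> 1)]
--     return [0] + rest if mask & 1 else rest
-- ===== Notes on version B (the rewrite author's own statement) =====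
-- stated objective: alternative
-- what changed: B is a structural recursion on the binary representation (recurse on mask >> 1, shift the recursive indices by 1, prepend 0 if the low bit is set) instead of A's iterative loop that repeatedly isolates and clears the lowest set bit via m & -m and bit_length.
import Mathlib
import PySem

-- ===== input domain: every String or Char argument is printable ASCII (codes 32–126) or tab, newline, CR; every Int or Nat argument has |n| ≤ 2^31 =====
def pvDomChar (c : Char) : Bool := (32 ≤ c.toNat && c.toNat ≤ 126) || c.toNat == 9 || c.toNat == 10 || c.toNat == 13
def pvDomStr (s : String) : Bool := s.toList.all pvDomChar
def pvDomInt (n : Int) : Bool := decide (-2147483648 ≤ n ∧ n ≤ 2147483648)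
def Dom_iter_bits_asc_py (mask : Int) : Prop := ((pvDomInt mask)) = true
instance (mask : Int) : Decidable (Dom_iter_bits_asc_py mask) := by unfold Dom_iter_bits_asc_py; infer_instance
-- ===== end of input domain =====

-- B replaces A's iterative lowest-set-bit loop (m & -m, bit_length) by a structural recursion
-- on the binary digits (recurse on mask >> 1, shift indices, prepend 0 on an odd mask);
-- same return value on all nonnegative masks (alternative, not faster).

-- ===== PORT A =====
-- Python's while loop; fuel mask.natAbs + 1 is enough for mask ≥ 0 (each step clears a set
-- bit, so at most bitCount ≤ natAbs iterations); for mask < 0 Python diverges (outside Pre_).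
def iterBitsAscGoA (fuel : Nat) (m : Int) (result : List Int) : List Int :=
  match fuel with
  | 0 => result
  | fuel+1 =>
    if m = 0 then result
    else
      let bit := PySem.Int.band m (-m)
      iterBitsAscGoA fuel (PySem.Int.bxor m bit) (result ++ [(PySem.Int.bitLength bit : Int) - 1])

def iter_bits_asc_py (mask : Int) : List Int :=
  iterBitsAscGoA (mask.natAbs + 1) mask []

-- ===== PORT B =====
-- B's recursion on mask >> 1; for mask ≥ 0 (Pre_) the Python shift is exactly Nat division
-- by 2, so we recurse on mask.toNat (on negative masks Python B hits the recursion limit,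
-- outside Pre_). Exact on Pre_.
def iterBitsAscRecB (n : Nat) : List Int :=
  if n = 0 then []
  else
    let rest := (iterBitsAscRecB (n / 2)).map (· + 1)
    if n % 2 = 1 then 0 :: rest else rest
  decreasing_by omega

def iter_bits_asc_py_alt (mask : Int) : List Int :=
  iterBitsAscRecB mask.toNat

-- ===== PRECONDITION & SPEC =====
-- Pre_ excludes negative masks: there Python A never returns (the while loop runs forever)
-- and Python B exceeds the recursion limit.
def Pre_iter_bits_asc_py (mask : Int) : Prop := 0 ≤ mask
instance (mask : Int) : Decidable (Pre_iter_bits_asc_py mask) := by unfold Pre_iter_bits_asc_py; infer_instance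
def pvWitness_iter_bits_asc_py : Int := (22)

def Spec_iter_bits_asc_py (mask : Int) (out : List Int) : Prop := out = iter_bits_asc_py_alt mask
instance (mask : Int) (out : List Int) : Decidable (Spec_iter_bits_asc_py mask out) := by unfold Spec_iter_bits_asc_py; infer_instance

-- ===== CLAIM (what is proved, stated in full; the proofs are below) =====
def Claim_equal_iter_bits_asc_py : Prop := ∀ (mask : Int), Dom_iter_bits_asc_py mask → Pre_iter_bits_asc_py mask → Spec_iter_bits_asc_py mask (iter_bits_asc_py mask)

-- ===== LEMMAS AND PROOFS =====

-- Nat bit facts used to relate the two computations.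
lemma land_odd_even (a b : Nat) : (2*a+1) &&& (2*b) = 2*(a &&& b) := by
  apply Nat.eq_of_testBit_eq; intro i
  rw [Nat.testBit_land]
  cases i with
  | zero => simp [Nat.testBit_zero]
  | succ i =>
    rw [Nat.testBit_succ, Nat.testBit_succ, Nat.testBit_succ,
        show (2*a+1)/2 = a by omega, show (2*b)/2 = b by omega,
        show (2*(a&&&b))/2 = a&&&b by omega, Nat.testBit_land]

lemma land_even_odd (a b : Nat) : (2*a) &&& (2*b+1) = 2*(a &&& b) := by
  apply Nat.eq_of_testBit_eq; intro i
  rw [Nat.testBit_land]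
  cases i with
  | zero => simp [Nat.testBit_zero]
  | succ i =>
    rw [Nat.testBit_succ, Nat.testBit_succ, Nat.testBit_succ,
        show (2*a)/2 = a by omega, show (2*b+1)/2 = b by omega,
        show (2*(a&&&b))/2 = a&&&b by omega, Nat.testBit_land]

lemma xor_even_even (a b : Nat) : (2*a) ^^^ (2*b) = 2*(a ^^^ b) := by
  apply Nat.eq_of_testBit_eq; intro i
  rw [Nat.testBit_xor]
  cases i with
  | zero => simp [Nat.testBit_zero]
  | succ i =>
    rw [Nat.testBit_succ, Nat.testBit_succ, Nat.testBit_succ,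
        show (2*a)/2 = a by omega, show (2*b)/2 = b by omega,
        show (2*(a^^^b))/2 = a^^^b by omega, Nat.testBit_xor]

lemma xor_odd_one (k : Nat) : (2*k+1) ^^^ 1 = 2*k := by
  apply Nat.eq_of_testBit_eq; intro i
  rw [Nat.testBit_xor]
  cases i with
  | zero => simp [Nat.testBit_zero]
  | succ i =>
    rw [Nat.testBit_succ, Nat.testBit_succ, Nat.testBit_succ,
        show (2*k+1)/2 = k by omega, show (1:Nat)/2 = 0 by omega]
    simp

lemma land_pred_odd (a : Nat) : (2*a+1) &&& (2*a) = 2*a := by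
  rw [land_odd_even, Nat.and_self]

lemma land_pred_even (m : Nat) (h : 0 < m) : (2*m) &&& (2*m-1) = 2*(m &&& (m-1)) := by
  rw [show 2*m-1 = 2*(m-1)+1 by omega, land_even_odd]

lemma land_pred_lt (n : Nat) (h : 0 < n) : n &&& (n-1) < n :=
  lt_of_le_of_lt (Nat.and_le_right) (by omega)

-- m & -m on a positive Int cast, expressed on Nat.
lemma band_neg_self (n : Nat) (h : 0 < n) :
    PySem.Int.band (n : Int) (-(n : Int)) = ((n - (n &&& (n-1)) : Nat) : Int) := by
  unfold PySem.Int.band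
  rw [if_pos (by positivity), if_neg (by omega)]
  norm_num

-- Clearing the lowest set bit: n ^ (n & -n) = n & (n-1).
lemma xor_lowbit (n : Nat) (h : 0 < n) : n ^^^ (n - (n &&& (n-1))) = n &&& (n-1) := by
  induction n using Nat.strong_induction_on with
  | _ n IH =>
    rcases Nat.mod_two_eq_zero_or_one n with h2 | h2
    · obtain ⟨m, hm⟩ : ∃ m, n = 2*m := ⟨n/2, by omega⟩
      subst hm
      have hmpos : 0 < m := by omega
      rw [land_pred_even m hmpos,
          show 2*m - 2*(m &&& (m-1)) = 2*(m - (m &&& (m-1))) by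
            have := Nat.and_le_right (n := m) (m := m-1); omega,
          xor_even_even, IH m (by omega) hmpos]
    · obtain ⟨a, ha⟩ : ∃ a, n = 2*a+1 := ⟨n/2, by omega⟩
      subst ha
      rw [show 2*a+1-1 = 2*a by omega, land_pred_odd,
          show 2*a+1 - 2*a = 1 by omega, xor_odd_one]

lemma recB_pos (n : Nat) (h : 0 < n) :
    iterBitsAscRecB n =
      (if n % 2 = 1 then [(0:Int)] else []) ++ (iterBitsAscRecB (n/2)).map (· + 1) := by
  rw [iterBitsAscRecB, if_neg (by omega)]
  rcases Nat.mod_two_eq_zero_or_one n with h2 | h2 <;> simp [h2]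

lemma recB_even (a : Nat) : iterBitsAscRecB (2*a) = (iterBitsAscRecB a).map (· + 1) := by
  cases a with
  | zero => rw [iterBitsAscRecB]; simp
  | succ a =>
    rw [recB_pos _ (by omega), show (2*(a+1)) % 2 = 0 by omega,
        show (2*(a+1))/2 = a+1 by omega]
    simp

-- B's recursion satisfies A's loop-body recurrence (emit the lowest set-bit index, clear it).
lemma recB_step (n : Nat) (h : 0 < n) :
    iterBitsAscRecB n = ((PySem.Int.bitLength ((n - (n &&& (n-1)) : Nat) : Int) : Int) - 1)
      :: iterBitsAscRecB (n &&& (n-1)) := by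
  induction n using Nat.strong_induction_on with
  | _ n IH =>
    rcases Nat.mod_two_eq_zero_or_one n with h2 | h2
    · obtain ⟨m, hm⟩ : ∃ m, n = 2*m := ⟨n/2, by omega⟩
      subst hm
      have hmpos : 0 < m := by omega
      have hk : m &&& (m-1) < m := land_pred_lt m hmpos
      have hlb : 0 < m - (m &&& (m-1)) := by omega
      have hbl : (PySem.Int.bitLength ((2*(m - (m &&& (m-1))) : Nat) : Int)) =
          PySem.Int.bitLength (((m - (m &&& (m-1))) : Nat) : Int) + 1 := by
        rw [PySem.Int.bitLength_natCast (by omega),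
            show 2*(m - (m &&& (m-1)))/2 = m - (m &&& (m-1)) by omega]
      rw [land_pred_even m hmpos,
          show 2*m - 2*(m &&& (m-1)) = 2*(m - (m &&& (m-1))) by
            have := Nat.and_le_right (n := m) (m := m-1); omega,
          recB_even, recB_even, IH m (by omega) hmpos, hbl]
      simp only [List.map_cons]
      congr 1
      push_cast
      ring
    · obtain ⟨a, ha⟩ : ∃ a, n = 2*a+1 := ⟨n/2, by omega⟩
      subst ha
      rw [show 2*a+1-1 = 2*a by omega, land_pred_odd,
          show 2*a+1 - 2*a = 1 by omega,
          recB_pos _ (by omega), show (2*a+1) % 2 = 1 by omega,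
          show (2*a+1)/2 = a by omega, recB_even]
      simp
      decide

-- A's loop computes B's recursion.
lemma goA_eq (n : Nat) : ∀ (fuel : Nat) (result : List Int), n < fuel →
    iterBitsAscGoA fuel (n : Int) result = result ++ iterBitsAscRecB n := by
  induction n using Nat.strong_induction_on with
  | _ n IH =>
    intro fuel result hf
    match fuel with
    | fuel+1 =>
      by_cases h0 : n = 0
      · subst h0; simp [iterBitsAscGoA, iterBitsAscRecB]
      · have hn : 0 < n := Nat.pos_of_ne_zero h0
        rw [iterBitsAscGoA, if_neg (by exact_mod_cast h0)]
        simp only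
        rw [band_neg_self n hn, PySem.Int.bxor_natCast, xor_lowbit n hn]
        rw [IH (n &&& (n-1)) (land_pred_lt n hn) fuel _
              (lt_of_lt_of_le (land_pred_lt n hn) (by omega)),
            recB_step n hn]
        simp

-- ===== VERDICT (by name: the statement is the Claim_ definition above) =====
theorem iter_bits_asc_py_spec : Claim_equal_iter_bits_asc_py := by
  intro mask _ hpre
  unfold Spec_iter_bits_asc_py iter_bits_asc_py iter_bits_asc_py_alt
  have h0 : 0 ≤ mask := hpre
  obtain ⟨n, rfl⟩ : ∃ n : Nat, mask = (n : Int) := ⟨mask.toNat, by omega⟩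
  rw [show ((n:Int)).natAbs = n by simp, show ((n:Int)).toNat = n by simp]
  rw [goA_eq n (n+1) [] (by omega)]
  simp
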